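-- pv_equiv track=rewrite | github.com/Shanto27/rosalind-python | rosalind.py | _get_subseq_grid
-- ===== SOURCE A (Python) =====
-- def _lcsm(seq1, seq2):
--     """
--     http://rosalind.info/problems/lcsq/
--     """
--     seq1_len = len(seq1)
--     seq2_len = len(seq2)
--
--     gridlen1 = seq1_len+1
--     gridlen2 = seq2_len+1
--
--     dist_grid = [[0 for x in range(gridlen2)] for y in range(gridlen1)]
--     trace_grid = [['--' for x in range(gridlen2)] for y in range(gridlen1)]
--
--     for i in range(gridlen1):
--         dist_grid[i][0] = 0
--
--     for i in range(gridlen2):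
--         dist_grid[0][i] = 0
--
--     for i in range(1,gridlen1):
--         for j in range(1,gridlen2):
--             if(seq1[i-1]==seq2[j-1]):
--                 dist_grid[i][j] = dist_grid[i-1][j-1]+1
--                 trace_grid[i][j]='↖'#cross back
--             else:
--                 dist_grid[i][j] = max(dist_grid[i-1][j], dist_grid[i][j-1])
--                 if(dist_grid[i][j]==dist_grid[i-1][j]):
--                     trace_grid[i][j]='↑ '#up back
--                 elif(dist_grid[i][j]==dist_grid[i][j-1]):
--                     trace_grid[i][j]='←'#left back
--
--     return [dist_grid, trace_grid]
--
-- def _get_subseq_grid(_my_records):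
--     """
--     http://rosalind.info/problems/lcsm/
--     http://rosalind.info/problems/lcsq/
--     """
--
--     subseq_grid = [[[] for x in range(len(_my_records))] for y in range(len(_my_records))]
--
--     for i in range(len(_my_records)):
--         for j in range(len(_my_records)):
--             if(i!=j):
--                 dist_grid, trace_grid = _lcsm(_my_records[i],_my_records[j])
--                 # subseq_grid[i][j]= _extract_lcsm_sub_string(_my_records[i],_my_records[j],trace_grid)
--                 subseq_grid[i][j]= extract_lcsm_seq(_my_records[i], _my_records[j], trace_grid)
--     return subseq_grid
--
-- def extract_lcsm_seq(seq1, seq2, trace_grid):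
--     lcsm_seq=''
--     i = len(seq1)
--     j = len(seq2)
--     while(i>0 and j>0):
--             if(trace_grid[i][j]=='↑ '):
--                 i-=1
--             elif(trace_grid[i][j]=='←'):
--                 j-=1
--             else:
--                 if(trace_grid[i][j]=='--'):
--                     break
--                 lcsm_seq+=seq1[i-1]
--                 i-=1
--                 j-=1
--     return [lcsm_seq[::-1]]
-- ===== SOURCE B (Python) =====
-- def _pair_lcs(seq1, seq2):
--     # DP that carries the chosen subsequence strings themselves in two rolling rows:
--     # no trace grid, no distance grid, no backward walk.  On ties the up-cell
--     # (previous row) is preferred, and equal characters always extend the diagonal,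
--     # which is exactly the choice A's traceback makes.
--     prev = [''] * (len(seq2) + 1)
--     for i in range(1, len(seq1) + 1):
--         cur = ['']
--         for j in range(1, len(seq2) + 1):
--             if seq1[i - 1] == seq2[j - 1]:
--                 cur.append(prev[j - 1] + seq1[i - 1])
--             else:
--                 cur.append(prev[j] if len(prev[j]) >= len(cur[j - 1]) else cur[j - 1])
--         prev = cur
--     return [prev[-1]]
--
-- def _get_subseq_grid(_my_records):
--     n = len(_my_records)
--     return [[_pair_lcs(_my_records[i], _my_records[j]) if i != j else []
--              for j in range(n)] for i in range(n)]
-- ===== Notes on version B (the rewrite author's own statement) =====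
-- stated objective: alternative
-- what changed: B eliminates both the trace grid and the backward traceback walk entirely: it runs a DP whose cells carry the chosen subsequence strings themselves in two rolling rows (up-cell preferred on length ties, diagonal on equal characters), reading the answer directly from the last cell, where A fills a full distance grid plus a string-arrow trace grid in place and then walks the trace grid backwards re-reading arrows to rebuild the string.
import Mathlib
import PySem

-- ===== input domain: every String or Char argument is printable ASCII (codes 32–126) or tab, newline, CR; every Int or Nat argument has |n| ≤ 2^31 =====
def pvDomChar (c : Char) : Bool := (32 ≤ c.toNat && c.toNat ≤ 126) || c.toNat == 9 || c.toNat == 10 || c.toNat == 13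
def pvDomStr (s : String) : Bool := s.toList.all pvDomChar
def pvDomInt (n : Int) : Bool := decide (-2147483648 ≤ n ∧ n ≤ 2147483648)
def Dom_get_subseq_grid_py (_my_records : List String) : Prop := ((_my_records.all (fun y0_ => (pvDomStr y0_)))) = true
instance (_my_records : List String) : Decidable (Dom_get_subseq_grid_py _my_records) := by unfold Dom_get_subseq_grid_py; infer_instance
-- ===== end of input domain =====

-- B drops A's trace grid AND the backward traceback walk: its DP cells carry the chosen
-- subsequence strings themselves in two rolling rows and the answer is read from the last cell;
-- objective: alternative (same asymptotic cost, different algorithm).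

-- ===== PORT A =====
-- Strings are handled through `toList`: Python's 1-character strings seq[k] become `Char`s,
-- which is exact because string equality of 1-character strings is character equality.
-- Loop indices while i>0 and j>0, starting at the lengths and only decremented, are ported as Nat
-- (exact: they stay nonnegative); all other indices are Int via PySem.pyRange/pyGetD/pySetD.
-- _lcsm returns the Python 2-element list [dist_grid, trace_grid] as a pair (heterogeneous list).
def pvLcsm (seq1 seq2 : List Char) : List (List Int) × List (List String) :=
  let seq1_len := seq1.length
  let seq2_len := seq2.length
  let gridlen1 := seq1_len + 1
  let gridlen2 := seq2_len + 1
  let dist_grid : List (List Int) :=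
    (PySem.List.pyRange 0 (gridlen1 : Int) 1).map
      (fun _ => (PySem.List.pyRange 0 (gridlen2 : Int) 1).map (fun _ => (0 : Int)))
  let trace_grid : List (List String) :=
    (PySem.List.pyRange 0 (gridlen1 : Int) 1).map
      (fun _ => (PySem.List.pyRange 0 (gridlen2 : Int) 1).map (fun _ => "--"))
  let dist_grid := (PySem.List.pyRange 0 (gridlen1 : Int) 1).foldl
    (fun dg i => PySem.List.pySetD dg i (PySem.List.pySetD (PySem.List.pyGetD dg i []) 0 0))
    dist_grid
  let dist_grid := (PySem.List.pyRange 0 (gridlen2 : Int) 1).foldl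
    (fun dg i => PySem.List.pySetD dg 0 (PySem.List.pySetD (PySem.List.pyGetD dg 0 []) i 0))
    dist_grid
  (PySem.List.pyRange 1 (gridlen1 : Int) 1).foldl (fun st i =>
    (PySem.List.pyRange 1 (gridlen2 : Int) 1).foldl (fun st j =>
      let dg := st.1
      let tg := st.2
      if PySem.List.pyGetD seq1 (i - 1) ' ' = PySem.List.pyGetD seq2 (j - 1) ' ' then
        (PySem.List.pySetD dg i (PySem.List.pySetD (PySem.List.pyGetD dg i []) j
            (PySem.List.pyGetD (PySem.List.pyGetD dg (i - 1) []) (j - 1) 0 + 1)),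
         PySem.List.pySetD tg i (PySem.List.pySetD (PySem.List.pyGetD tg i []) j "↖"))
      else
        let v := max (PySem.List.pyGetD (PySem.List.pyGetD dg (i - 1) []) j 0)
                     (PySem.List.pyGetD (PySem.List.pyGetD dg i []) (j - 1) 0)
        let dg := PySem.List.pySetD dg i (PySem.List.pySetD (PySem.List.pyGetD dg i []) j v)
        let tg :=
          if PySem.List.pyGetD (PySem.List.pyGetD dg i []) j 0 =
             PySem.List.pyGetD (PySem.List.pyGetD dg (i - 1) []) j 0 then
            PySem.List.pySetD tg i (PySem.List.pySetD (PySem.List.pyGetD tg i []) j "↑ ")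
          else if PySem.List.pyGetD (PySem.List.pyGetD dg i []) j 0 =
                  PySem.List.pyGetD (PySem.List.pyGetD dg i []) (j - 1) 0 then
            PySem.List.pySetD tg i (PySem.List.pySetD (PySem.List.pyGetD tg i []) j "←")
          else tg
        (dg, tg)) st)
    (dist_grid, trace_grid)

-- the while-loop of extract_lcsm_seq (break on '--' returns the accumulator as-is)
def pvExtract (seq1 seq2 : List Char) (trace_grid : List (List String)) (i j : Nat)
    (lcsm_seq : List Char) : List Char :=
  if _h : 0 < i ∧ 0 < j then
    if PySem.List.pyGetD (PySem.List.pyGetD trace_grid (i : Int) []) (j : Int) "" = "↑ " then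
      pvExtract seq1 seq2 trace_grid (i - 1) j lcsm_seq
    else if PySem.List.pyGetD (PySem.List.pyGetD trace_grid (i : Int) []) (j : Int) "" = "←" then
      pvExtract seq1 seq2 trace_grid i (j - 1) lcsm_seq
    else if PySem.List.pyGetD (PySem.List.pyGetD trace_grid (i : Int) []) (j : Int) "" = "--" then
      lcsm_seq
    else
      pvExtract seq1 seq2 trace_grid (i - 1) (j - 1)
        (lcsm_seq ++ [PySem.List.pyGetD seq1 ((i : Int) - 1) ' '])
  else lcsm_seq
termination_by i + j
decreasing_by all_goals omega

-- lcsm_seq[::-1] is List.reverse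
def pvExtractLcsmSeq (seq1 seq2 : List Char) (trace_grid : List (List String)) : List String :=
  [String.ofList (pvExtract seq1 seq2 trace_grid seq1.length seq2.length []).reverse]

def get_subseq_grid_py (_my_records : List String) : List (List (List String)) :=
  let n := _my_records.length
  let subseq_grid : List (List (List String)) :=
    (PySem.List.pyRange 0 (n : Int) 1).map
      (fun _ => (PySem.List.pyRange 0 (n : Int) 1).map (fun _ => ([] : List String)))
  (PySem.List.pyRange 0 (n : Int) 1).foldl (fun g i =>
    (PySem.List.pyRange 0 (n : Int) 1).foldl (fun g j =>
      if i ≠ j then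
        let st := pvLcsm (PySem.List.pyGetD _my_records i "").toList
                         (PySem.List.pyGetD _my_records j "").toList
        PySem.List.pySetD g i (PySem.List.pySetD (PySem.List.pyGetD g i []) j
          (pvExtractLcsmSeq (PySem.List.pyGetD _my_records i "").toList
                            (PySem.List.pyGetD _my_records j "").toList st.2))
      else g) g) subseq_grid

-- ===== PORT B =====
-- Transliteration of Source B's _pair_lcs: Python strings become `List Char` cells
-- ('' = [], s + c = ++ [c], len = .length); [''] * (len2+1) is List.replicate;
-- list.append is ++ [·]; prev[-1] is pyGetD at -1.  No trace grid and no traceback.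
def pvPairLcs (seq1 seq2 : List Char) : List String :=
  let prev : List (List Char) := List.replicate (seq2.length + 1) []
  let prev := (PySem.List.pyRange 1 ((seq1.length + 1 : Nat) : Int) 1).foldl (fun prev i =>
    (PySem.List.pyRange 1 ((seq2.length + 1 : Nat) : Int) 1).foldl (fun cur j =>
      if PySem.List.pyGetD seq1 (i - 1) ' ' = PySem.List.pyGetD seq2 (j - 1) ' ' then
        cur ++ [PySem.List.pyGetD prev (j - 1) [] ++ [PySem.List.pyGetD seq1 (i - 1) ' ']]
      else
        cur ++ [if (PySem.List.pyGetD prev j []).length ≥ (PySem.List.pyGetD cur (j - 1) []).length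
                then PySem.List.pyGetD prev j [] else PySem.List.pyGetD cur (j - 1) []])
      ([([] : List Char)])) prev
  [String.ofList (PySem.List.pyGetD prev (-1) [])]

def get_subseq_grid_py_alt (_my_records : List String) : List (List (List String)) :=
  let n := _my_records.length
  (PySem.List.pyRange 0 (n : Int) 1).map (fun i =>
    (PySem.List.pyRange 0 (n : Int) 1).map (fun j =>
      if i ≠ j then
        pvPairLcs (PySem.List.pyGetD _my_records i "").toList
                  (PySem.List.pyGetD _my_records j "").toList
      else []))

-- ===== PRECONDITION & SPEC =====
def Spec_get_subseq_grid_py (_my_records : List String) (out : List (List (List String))) : Prop := out = get_subseq_grid_py_alt _my_records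
instance (_my_records : List String) (out : List (List (List String))) : Decidable (Spec_get_subseq_grid_py _my_records out) := by unfold Spec_get_subseq_grid_py; infer_instance

-- ===== CLAIM (what is proved, stated in full; the proofs are below) =====
def Claim_equal_get_subseq_grid_py : Prop := ∀ (_my_records : List String), Dom_get_subseq_grid_py _my_records → Spec_get_subseq_grid_py _my_records (get_subseq_grid_py _my_records)

-- ===== LEMMAS AND PROOFS =====

-- ---- generic helpers ----
theorem pvFoldRangeInv {α : Type} (P : Nat → α → Prop) (f : α → Nat → α) (n : Nat) (a : α)
    (h0 : P 0 a) (hs : ∀ m b, m < n → P m b → P (m + 1) (f b m)) :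
    P n ((List.range n).foldl f a) := by
  induction n with
  | zero => simpa using h0
  | succ n ih =>
    rw [List.range_succ, List.foldl_append]
    exact hs n _ (Nat.lt_succ_self n) (ih (fun m b hm => hs m b (Nat.lt_succ_of_lt hm)))

theorem pvGetDSet {α : Type} (xs : List α) (i j : Nat) (v d : α) (h : i < xs.length) :
    (xs.set i v).getD j d = if j = i then v else xs.getD j d := by
  by_cases hij : j = i
  · subst hij; simp [List.getD_eq_getElem?_getD, h]
  · simp [List.getD_eq_getElem?_getD, List.getElem?_set_ne (by omega : i ≠ j), hij]

theorem pvGetDAppendLt {α : Type} (l l' : List α) (n : Nat) (d : α) (h : n < l.length) :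
    (l ++ l').getD n d = l.getD n d := List.getD_append l l' d n h

theorem pvGetDAppendEq {α : Type} (l : List α) (x d : α) : (l ++ [x]).getD l.length d = x := by
  simp [List.getD_eq_getElem?_getD]

theorem pvCastPred (i : Nat) (h : 0 < i) : (i : Int) - 1 = ((i - 1 : Nat) : Int) := by omega

theorem pvCastAddOne (k : Nat) : (1 : Int) + (k : Int) = ((k + 1 : Nat) : Int) := by omega

theorem pvCastSucc (k : Nat) : ((k + 1 : Nat) : Int) - 1 = (k : Int) := by omega

theorem pvRangeOneNat (l : Nat) :
    PySem.List.pyRange 1 ((l + 1 : Nat) : Int) 1 = (List.range l).map (fun k : Nat => (1:Int) + (k:Int)) := by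
  rw [PySem.List.pyRange_one]
  have h : (((l + 1 : Nat) : Int) - 1).toNat = l := by omega
  rw [h]

theorem pvRangeZeroNat (l : Nat) :
    PySem.List.pyRange 0 (l : Int) 1 = (List.range l).map (fun k : Nat => (k : Int)) :=
  PySem.List.pyRange_zero_nat l

-- fold invariant over `for i in range(1, n+1)` (the loop body receives ((m+1 : Nat) : Int))
theorem pvFoldPyRangeInv1 {α : Type} (P : Nat → α → Prop) (f : α → Int → α) (n : Nat) (a : α)
    (h0 : P 0 a) (hs : ∀ m b, m < n → P m b → P (m + 1) (f b ((m + 1 : Nat) : Int))) :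
    P n ((PySem.List.pyRange 1 ((n + 1 : Nat) : Int) 1).foldl f a) := by
  rw [pvRangeOneNat, List.foldl_map]
  apply pvFoldRangeInv _ _ n a h0
  intro m b hm hb
  rw [pvCastAddOne]
  exact hs m b hm hb

-- fold invariant over `for i in range(n)` (the loop body receives (m : Int))
theorem pvFoldPyRangeInv0 {α : Type} (P : Nat → α → Prop) (f : α → Int → α) (n : Nat) (a : α)
    (h0 : P 0 a) (hs : ∀ m b, m < n → P m b → P (m + 1) (f b (m : Int))) :
    P n ((PySem.List.pyRange 0 (n : Int) 1).foldl f a) := by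
  rw [pvRangeZeroNat, List.foldl_map]
  exact pvFoldRangeInv _ _ n a h0 hs

-- ---- the LCS length table A tabulates ----
def pvL (s1 s2 : List Char) : Nat → Nat → Int
  | 0, _ => 0
  | _ + 1, 0 => 0
  | i + 1, j + 1 =>
      if s1.getD i ' ' = s2.getD j ' ' then pvL s1 s2 i j + 1
      else max (pvL s1 s2 i (j + 1)) (pvL s1 s2 (i + 1) j)
termination_by i j => i + j

@[simp] theorem pvL_zero_left (s1 s2 : List Char) (j : Nat) : pvL s1 s2 0 j = 0 := by
  cases j <;> simp [pvL]

@[simp] theorem pvL_zero_right (s1 s2 : List Char) (i : Nat) : pvL s1 s2 i 0 = 0 := by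
  cases i <;> simp [pvL]

-- A's trace-grid entry at (i,j), 1 ≤ i,j
def pvTr (s1 s2 : List Char) (i j : Nat) : String :=
  if s1.getD (i - 1) ' ' = s2.getD (j - 1) ' ' then "↖"
  else if pvL s1 s2 i (j - 1) ≤ pvL s1 s2 (i - 1) j then "↑ " else "←"

-- ---- the subsequence string both programs converge on ----
-- pvF i j is the string A's traceback emits from cell (i,j) and B's DP stores at cell (i,j)
def pvF (s1 s2 : List Char) : Nat → Nat → List Char
  | 0, _ => []
  | _ + 1, 0 => []
  | i + 1, j + 1 =>
      if s1.getD i ' ' = s2.getD j ' ' then pvF s1 s2 i j ++ [s1.getD i ' ']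
      else if (pvF s1 s2 (i + 1) j).length ≤ (pvF s1 s2 i (j + 1)).length then pvF s1 s2 i (j + 1)
      else pvF s1 s2 (i + 1) j
termination_by i j => i + j

@[simp] theorem pvF_zero_left (s1 s2 : List Char) (j : Nat) : pvF s1 s2 0 j = [] := by
  cases j <;> simp [pvF]

@[simp] theorem pvF_zero_right (s1 s2 : List Char) (i : Nat) : pvF s1 s2 i 0 = [] := by
  cases i <;> simp [pvF]

-- A's table value is the length of pvF
theorem pvF_len (s1 s2 : List Char) :
    ∀ n i j, i + j ≤ n → pvL s1 s2 i j = ((pvF s1 s2 i j).length : Int) := by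
  intro n
  induction n with
  | zero =>
    intro i j h
    have hi : i = 0 := by omega
    subst hi; simp
  | succ n ih =>
    intro i j h
    match i, j with
    | 0, j => simp
    | i + 1, 0 => simp
    | i + 1, j + 1 =>
      rw [pvL, pvF]
      by_cases hch : s1.getD i ' ' = s2.getD j ' '
      · rw [if_pos hch, if_pos hch, ih i j (by omega)]
        simp
      · rw [if_neg hch, if_neg hch, ih i (j + 1) (by omega), ih (i + 1) j (by omega)]
        by_cases hle : (pvF s1 s2 (i + 1) j).length ≤ (pvF s1 s2 i (j + 1)).length
        · rw [if_pos hle]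
          omega
        · rw [if_neg hle]
          omega

-- ---- invariants for A's grids ----
def pvDistMid (s1 s2 : List Char) (k m : Nat) (dg : List (List Int)) : Prop :=
  dg.length = s1.length + 1 ∧
  (∀ i, i ≤ s1.length → (dg.getD i []).length = s2.length + 1) ∧
  (∀ i, i ≤ s1.length → ∀ j, j ≤ s2.length →
     (dg.getD i []).getD j 0 = if i ≤ k ∨ (i = k + 1 ∧ j ≤ m) then pvL s1 s2 i j else 0)

def pvTraceMid (s1 s2 : List Char) (k m : Nat) (tg : List (List String)) : Prop :=
  tg.length = s1.length + 1 ∧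
  (∀ i, i ≤ s1.length → (tg.getD i []).length = s2.length + 1) ∧
  (∀ i, 1 ≤ i → i ≤ s1.length → ∀ j, 1 ≤ j → j ≤ s2.length →
     (tg.getD i []).getD j "" = if i ≤ k ∨ (i = k + 1 ∧ j ≤ m) then pvTr s1 s2 i j else "--")

theorem pvSetD_zero {α : Type} (xs : List α) (v : α) :
    PySem.List.pySetD xs (0 : Int) v = xs.set 0 v := by
  rw [show (0 : Int) = ((0 : Nat) : Int) by norm_num, PySem.List.pySetD_natCast]

theorem pvGetD_zero {α : Type} (xs : List α) (d : α) :
    PySem.List.pyGetD xs (0 : Int) d = xs.getD 0 d := by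
  rw [show (0 : Int) = ((0 : Nat) : Int) by norm_num, PySem.List.pyGetD_natCast]

theorem pvMapConst {α : Type} (n : Nat) (c : α) :
    (PySem.List.pyRange 0 (n : Int) 1).map (fun _ => c) = List.replicate n c := by
  rw [pvRangeZeroNat, List.map_map]
  simp [Function.comp_def]

-- the two zero-writing loops leave the all-zero grid unchanged
theorem pvZeroLoops (l1 l2 : Nat) :
    ((PySem.List.pyRange 0 ((l2 + 1 : Nat) : Int) 1).foldl
      (fun dg i => PySem.List.pySetD dg 0 (PySem.List.pySetD (PySem.List.pyGetD dg 0 []) i 0))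
      ((PySem.List.pyRange 0 ((l1 + 1 : Nat) : Int) 1).foldl
        (fun dg i => PySem.List.pySetD dg i (PySem.List.pySetD (PySem.List.pyGetD dg i []) 0 0))
        (List.replicate (l1 + 1) (List.replicate (l2 + 1) (0 : Int))))) =
      List.replicate (l1 + 1) (List.replicate (l2 + 1) (0 : Int)) := by
  have h1 : ((PySem.List.pyRange 0 ((l1 + 1 : Nat) : Int) 1).foldl
      (fun dg i => PySem.List.pySetD dg i (PySem.List.pySetD (PySem.List.pyGetD dg i []) 0 0))
      (List.replicate (l1 + 1) (List.replicate (l2 + 1) (0 : Int)))) =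
      List.replicate (l1 + 1) (List.replicate (l2 + 1) (0 : Int)) := by
    apply pvFoldPyRangeInv0
      (fun _ dg => dg = List.replicate (l1 + 1) (List.replicate (l2 + 1) (0 : Int))) _ (l1 + 1) _ rfl
    intro m dg hm hdg
    subst hdg
    rw [PySem.List.pyGetD_natCast, pvSetD_zero, PySem.List.pySetD_natCast]
    rw [List.getD_replicate _ (by omega : m < l1 + 1)]
    rw [List.set_replicate_self, List.set_replicate_self]
  rw [h1]
  apply pvFoldPyRangeInv0
    (fun _ dg => dg = List.replicate (l1 + 1) (List.replicate (l2 + 1) (0 : Int))) _ (l2 + 1) _ rfl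
  intro m dg hm hdg
  subst hdg
  rw [pvGetD_zero, PySem.List.pySetD_natCast, pvSetD_zero]
  rw [List.getD_replicate _ (by omega : 0 < l1 + 1)]
  rw [List.set_replicate_self, List.set_replicate_self]

-- a write of the correct cell value preserves the mid-loop invariants
theorem pvMidStepD (s1 s2 : List Char) (m t : Nat) (dg : List (List Int))
    (hm : m < s1.length) (ht : t < s2.length) (hD : pvDistMid s1 s2 m t dg)
    (v : Int) (hv : v = pvL s1 s2 (m + 1) (t + 1)) :
    pvDistMid s1 s2 m (t + 1) (dg.set (m + 1) (((dg.getD (m + 1) []).set (t + 1) v))) := by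
  obtain ⟨hlen, hrlen, hval⟩ := hD
  have hmr : m + 1 < dg.length := by omega
  have htr : t + 1 < (dg.getD (m + 1) []).length := by rw [hrlen (m + 1) (by omega)]; omega
  refine ⟨by simp [hlen], ?_, ?_⟩
  · intro i hi
    rw [pvGetDSet _ _ _ _ _ hmr]
    split
    · rw [List.length_set]
      exact hrlen (m + 1) (by omega)
    · exact hrlen i hi
  · intro i hi j hj
    rw [pvGetDSet _ _ _ _ _ hmr]
    by_cases him : i = m + 1
    · rw [if_pos him, him, pvGetDSet _ _ _ _ _ htr]
      by_cases hjt : j = t + 1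
      · rw [if_pos hjt, if_pos (by omega)]
        rw [hv, hjt]
      · rw [if_neg hjt, hval (m + 1) (by omega) j hj]
        exact if_congr (by omega) rfl rfl
    · rw [if_neg him, hval i hi j hj]
      exact if_congr (by omega) rfl rfl

theorem pvMidStepT (s1 s2 : List Char) (m t : Nat) (tg : List (List String))
    (hm : m < s1.length) (ht : t < s2.length) (hT : pvTraceMid s1 s2 m t tg)
    (w : String) (hw : w = pvTr s1 s2 (m + 1) (t + 1)) :
    pvTraceMid s1 s2 m (t + 1) (tg.set (m + 1) (((tg.getD (m + 1) []).set (t + 1) w))) := by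
  obtain ⟨hlen, hrlen, hval⟩ := hT
  have hmr : m + 1 < tg.length := by omega
  have htr : t + 1 < (tg.getD (m + 1) []).length := by rw [hrlen (m + 1) (by omega)]; omega
  refine ⟨by simp [hlen], ?_, ?_⟩
  · intro i hi
    rw [pvGetDSet _ _ _ _ _ hmr]
    split
    · rw [List.length_set]
      exact hrlen (m + 1) (by omega)
    · exact hrlen i hi
  · intro i hi1 hi j hj1 hj
    rw [pvGetDSet _ _ _ _ _ hmr]
    by_cases him : i = m + 1
    · rw [if_pos him, him, pvGetDSet _ _ _ _ _ htr]
      by_cases hjt : j = t + 1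
      · rw [if_pos hjt, if_pos (by omega)]
        rw [hw, hjt]
      · rw [if_neg hjt, hval (m + 1) (by omega) (by omega) j hj1 hj]
        exact if_congr (by omega) rfl rfl
    · rw [if_neg him, hval i hi1 hi j hj1 hj]
      exact if_congr (by omega) rfl rfl

theorem pvLcsm_ok (s1 s2 : List Char) :
    pvDistMid s1 s2 s1.length 0 (pvLcsm s1 s2).1 ∧
    pvTraceMid s1 s2 s1.length 0 (pvLcsm s1 s2).2 := by
  rw [pvLcsm]
  simp only [pvMapConst, pvZeroLoops]
  refine pvFoldPyRangeInv1
    (fun k (st : List (List Int) × List (List String)) =>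
      pvDistMid s1 s2 k 0 st.1 ∧ pvTraceMid s1 s2 k 0 st.2) _ s1.length _ ?_ ?_
  · constructor
    · refine ⟨by simp, ?_, ?_⟩
      · intro i hi
        rw [List.getD_replicate _ (by omega : i < s1.length + 1)]
        simp
      · intro i hi j hj
        rw [List.getD_replicate _ (by omega : i < s1.length + 1),
            List.getD_replicate _ (by omega : j < s2.length + 1)]
        split
        · next h =>
          rcases h with h | ⟨h, h'⟩
          · have : i = 0 := by omega
            subst this; simp
          · have : j = 0 := by omega
            subst this; simp
        · rfl
    · refine ⟨by simp, ?_, ?_⟩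
      · intro i hi
        rw [List.getD_replicate _ (by omega : i < s1.length + 1)]
        simp
      · intro i hi1 hi j hj1 hj
        rw [List.getD_replicate _ (by omega : i < s1.length + 1),
            List.getD_replicate _ (by omega : j < s2.length + 1)]
        rw [if_neg (by omega)]
  · intro m st hm hP
    obtain ⟨dg, tg⟩ := st
    obtain ⟨hD, hT⟩ := hP
    have key : ∀ st' : List (List Int) × List (List String),
        pvDistMid s1 s2 m s2.length st'.1 ∧ pvTraceMid s1 s2 m s2.length st'.2 →
        pvDistMid s1 s2 (m + 1) 0 st'.1 ∧ pvTraceMid s1 s2 (m + 1) 0 st'.2 := by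
      intro st' ⟨⟨h1, h2, h3⟩, ⟨g1, g2, g3⟩⟩
      constructor
      · refine ⟨h1, h2, ?_⟩
        intro i hi j hj
        rw [h3 i hi j hj]
        by_cases hc : i ≤ m + 1
        · rw [if_pos (by omega), if_pos (by omega)]
        · by_cases hc2 : i = m + 2 ∧ j = 0
          · rw [if_neg (by omega), if_pos (by omega)]
            rw [hc2.2]
            simp
          · rw [if_neg (by omega), if_neg (by omega)]
      · refine ⟨g1, g2, ?_⟩
        intro i hi1 hi j hj1 hj
        rw [g3 i hi1 hi j hj1 hj]
        exact if_congr (by omega) rfl rfl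
    refine key _ ?_
    refine pvFoldPyRangeInv1
      (fun t (st : List (List Int) × List (List String)) =>
        pvDistMid s1 s2 m t st.1 ∧ pvTraceMid s1 s2 m t st.2) _ s2.length _ ⟨hD, hT⟩ ?_
    intro t st ht hQ
    obtain ⟨dg', tg'⟩ := st
    obtain ⟨hDq, hTq⟩ := hQ
    dsimp only at hDq hTq
    simp only [pvCastSucc, PySem.List.pyGetD_natCast, PySem.List.pySetD_natCast]
    obtain ⟨hlen, hrlen, hval⟩ := hDq
    have he1 : (dg'.getD m []).getD (t + 1) 0 = pvL s1 s2 m (t + 1) := by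
      rw [hval m (by omega) (t + 1) (by omega), if_pos (Or.inl le_rfl)]
    have he2 : (dg'.getD (m + 1) []).getD t 0 = pvL s1 s2 (m + 1) t := by
      rw [hval (m + 1) (by omega) t (by omega), if_pos (Or.inr ⟨rfl, le_rfl⟩)]
    by_cases hch : s1.getD m ' ' = s2.getD t ' '
    · rw [if_pos hch]
      constructor
      · apply pvMidStepD s1 s2 m t dg' hm ht ⟨hlen, hrlen, hval⟩
        rw [hval m (by omega) t (by omega), if_pos (Or.inl le_rfl), pvL, if_pos hch]
      · apply pvMidStepT s1 s2 m t tg' hm ht hTq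
        simp only [pvTr, Nat.add_sub_cancel]
        rw [if_pos hch]
    · rw [if_neg hch]
      have hmr : m + 1 < dg'.length := by omega
      have htr : t + 1 < (dg'.getD (m + 1) []).length := by
        rw [hrlen (m + 1) (by omega)]; omega
      have hd1 : ((dg'.set (m + 1) ((dg'.getD (m + 1) []).set (t + 1)
            (max ((dg'.getD m []).getD (t + 1) 0) ((dg'.getD (m + 1) []).getD t 0)))).getD (m + 1) []).getD (t + 1) 0 =
          max ((dg'.getD m []).getD (t + 1) 0) ((dg'.getD (m + 1) []).getD t 0) := by
        rw [pvGetDSet _ _ _ _ _ hmr, if_pos rfl, pvGetDSet _ _ _ _ _ htr, if_pos rfl]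
      have hd2 : ((dg'.set (m + 1) ((dg'.getD (m + 1) []).set (t + 1)
            (max ((dg'.getD m []).getD (t + 1) 0) ((dg'.getD (m + 1) []).getD t 0)))).getD m []).getD (t + 1) 0 =
          (dg'.getD m []).getD (t + 1) 0 := by
        rw [pvGetDSet _ _ _ _ _ hmr, if_neg (by omega)]
      have hd3 : ((dg'.set (m + 1) ((dg'.getD (m + 1) []).set (t + 1)
            (max ((dg'.getD m []).getD (t + 1) 0) ((dg'.getD (m + 1) []).getD t 0)))).getD (m + 1) []).getD t 0 =
          (dg'.getD (m + 1) []).getD t 0 := by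
        rw [pvGetDSet _ _ _ _ _ hmr, if_pos rfl, pvGetDSet _ _ _ _ _ htr, if_neg (by omega)]
      rw [hd1, hd2, hd3, he1, he2]
      have hvmax : max (pvL s1 s2 m (t + 1)) (pvL s1 s2 (m + 1) t) = pvL s1 s2 (m + 1) (t + 1) := by
        rw [pvL, if_neg hch]
      by_cases hle : pvL s1 s2 (m + 1) t ≤ pvL s1 s2 m (t + 1)
      · rw [if_pos (max_eq_left hle)]
        constructor
        · apply pvMidStepD s1 s2 m t dg' hm ht ⟨hlen, hrlen, hval⟩
          exact hvmax
        · apply pvMidStepT s1 s2 m t tg' hm ht hTq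
          simp only [pvTr, Nat.add_sub_cancel]
          rw [if_neg hch, if_pos hle]
      · have hmaxr : max (pvL s1 s2 m (t + 1)) (pvL s1 s2 (m + 1) t) = pvL s1 s2 (m + 1) t :=
          max_eq_right (by omega)
        rw [if_neg (by rw [hmaxr]; omega), if_pos hmaxr]
        constructor
        · apply pvMidStepD s1 s2 m t dg' hm ht ⟨hlen, hrlen, hval⟩
          exact hvmax
        · apply pvMidStepT s1 s2 m t tg' hm ht hTq
          simp only [pvTr, Nat.add_sub_cancel]
          rw [if_neg hch, if_neg hle]

-- ---- A's traceback emits pvF ----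
theorem pvExtract_eq_pvF (s1 s2 : List Char) (tg : List (List String))
    (hT : pvTraceMid s1 s2 s1.length 0 tg) :
    ∀ n i j acc, i + j ≤ n → i ≤ s1.length → j ≤ s2.length →
      pvExtract s1 s2 tg i j acc = acc ++ (pvF s1 s2 i j).reverse := by
  intro n
  induction n with
  | zero =>
    intro i j acc hn hi hj
    have : i = 0 := by omega
    subst this
    rw [pvExtract]
    simp
  | succ n ih =>
    intro i j acc hn hi hj
    rw [pvExtract]
    by_cases hij : 0 < i ∧ 0 < j
    · obtain ⟨hi0, hj0⟩ := hij
      rw [dif_pos ⟨hi0, hj0⟩]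
      have htr : (tg.getD i []).getD j "" = pvTr s1 s2 i j := by
        have h := hT.2.2 i hi0 hi j hj0 hj
        rwa [if_pos (Or.inl hi)] at h
      simp only [pvCastPred i hi0, PySem.List.pyGetD_natCast, htr]
      -- pvF at (i,j) with 0 < i, 0 < j: expose the succ-succ equation
      obtain ⟨i', rfl⟩ : ∃ i', i = i' + 1 := ⟨i - 1, by omega⟩
      obtain ⟨j', rfl⟩ : ∃ j', j = j' + 1 := ⟨j - 1, by omega⟩
      simp only [Nat.add_sub_cancel]
      rw [pvTr]
      simp only [Nat.add_sub_cancel]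
      by_cases hch : s1.getD i' ' ' = s2.getD j' ' '
      · rw [if_pos hch,
            if_neg (by decide : ¬("↖" : String) = "↑ "), if_neg (by decide : ¬("↖" : String) = "←"),
            if_neg (by decide : ¬("↖" : String) = "--")]
        rw [ih i' j' _ (by omega) (by omega) (by omega)]
        rw [pvF, if_pos hch]
        simp
      · rw [if_neg hch]
        have hlencond : pvL s1 s2 (i' + 1) j' ≤ pvL s1 s2 i' (j' + 1) ↔
            (pvF s1 s2 (i' + 1) j').length ≤ (pvF s1 s2 i' (j' + 1)).length := by
          rw [pvF_len s1 s2 (i' + j' + 1) (i' + 1) j' (by omega),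
              pvF_len s1 s2 (i' + j' + 1) i' (j' + 1) (by omega)]
          omega
        by_cases hle : pvL s1 s2 (i' + 1) j' ≤ pvL s1 s2 i' (j' + 1)
        · rw [if_pos hle, if_pos rfl]
          rw [ih i' (j' + 1) _ (by omega) (by omega) (by omega)]
          rw [pvF, if_neg hch, if_pos (hlencond.mp hle)]
        · rw [if_neg hle, if_neg (by decide : ¬("←" : String) = "↑ "), if_pos rfl]
          rw [ih (i' + 1) j' _ (by omega) (by omega) (by omega)]
          rw [pvF, if_neg hch, if_neg (fun h => hle (hlencond.mpr h))]
    · rw [dif_neg hij]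
      have : i = 0 ∨ j = 0 := by omega
      rcases this with h | h <;> subst h <;> simp
-- ---- B's rolling rows store pvF ----
theorem pvPairLcs_eq (s1 s2 : List Char) :
    pvPairLcs s1 s2 = [String.ofList (pvF s1 s2 s1.length s2.length)] := by
  rw [pvPairLcs]
  have key : ∀ prev : List (List Char),
      (prev.length = s2.length + 1 ∧
       ∀ j, j ≤ s2.length → prev.getD j [] = pvF s1 s2 s1.length j) →
      [String.ofList (PySem.List.pyGetD prev (-1) [])] =
        [String.ofList (pvF s1 s2 s1.length s2.length)] := by
    intro prev ⟨hlen, hval⟩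
    have hne : prev ≠ [] := by intro h; rw [h] at hlen; simp at hlen
    rw [PySem.List.pyGetD_neg_one prev [] hne]
    rw [List.getLast_eq_getElem]
    rw [← List.getD_eq_getElem prev [] (by omega)]
    rw [show prev.length - 1 = s2.length by omega, hval s2.length le_rfl]
  apply key
  refine pvFoldPyRangeInv1
    (fun k (prev : List (List Char)) =>
      prev.length = s2.length + 1 ∧ ∀ j, j ≤ s2.length → prev.getD j [] = pvF s1 s2 k j)
    _ s1.length _ ?_ ?_
  · refine ⟨by simp, ?_⟩
    intro j hj
    rw [List.getD_replicate _ (by omega : j < s2.length + 1)]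
    simp
  · intro m prev hm hprev
    obtain ⟨hlen, hval⟩ := hprev
    refine pvFoldPyRangeInv1
      (fun t (cur : List (List Char)) =>
        cur.length = t + 1 ∧ ∀ u, u ≤ t → cur.getD u [] = pvF s1 s2 (m + 1) u)
      _ s2.length _ ?_ ?_
    · exact ⟨rfl, by intro u hu; interval_cases u; simp⟩
    · intro t cur ht hQ
      obtain ⟨hclen, hcval⟩ := hQ
      simp only [pvCastSucc, PySem.List.pyGetD_natCast]
      have hnew :
          (if s1.getD m ' ' = s2.getD t ' ' then prev.getD t [] ++ [s1.getD m ' ']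
           else if (prev.getD (t + 1) []).length ≥ (cur.getD t []).length
                then prev.getD (t + 1) [] else cur.getD t []) = pvF s1 s2 (m + 1) (t + 1) := by
        rw [hval t (by omega), hval (t + 1) (by omega), hcval t le_rfl, pvF]
      constructor
      · split <;> simp [hclen]
      · intro u hu
        rcases Nat.lt_or_ge u (t + 1) with hu' | hu'
        · have hlt : u < cur.length := by omega
          split <;> rw [pvGetDAppendLt _ _ _ _ hlt] <;> exact hcval u (by omega)
        · have hueq : u = t + 1 := by omega
          subst hueq
          have happ : ∀ v : List Char, (cur ++ [v]).getD (t + 1) [] = v := by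
            intro v
            conv_lhs => rw [hclen.symm]
            exact pvGetDAppendEq _ _ _
          split
          · next hc => rw [happ, ← hnew, if_pos hc]
          · next hc => rw [happ, ← hnew, if_neg hc]

-- per-pair agreement
theorem pvPair_eq (s1 s2 : List Char) :
    pvExtractLcsmSeq s1 s2 (pvLcsm s1 s2).2 = pvPairLcs s1 s2 := by
  rw [pvPairLcs_eq, pvExtractLcsmSeq,
    pvExtract_eq_pvF s1 s2 _ (pvLcsm_ok s1 s2).2 (s1.length + s2.length) _ _ []
      le_rfl le_rfl le_rfl]
  simp

-- outer-grid invariant: after the first k rows are processed, row i holds B's values for i < k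
def pvGridOK (r : List String) (k : Nat) (g : List (List (List String))) : Prop :=
  g.length = r.length ∧
  (∀ i, i < r.length → (g.getD i []).length = r.length) ∧
  (∀ i, i < r.length → ∀ j, j < r.length → (g.getD i []).getD j [] =
    if i < k ∧ i ≠ j then pvPairLcs (r.getD i "").toList (r.getD j "").toList else [])

def pvGridMid (r : List String) (m t : Nat) (g : List (List (List String))) : Prop :=
  g.length = r.length ∧
  (∀ i, i < r.length → (g.getD i []).length = r.length) ∧
  (∀ i, i < r.length → ∀ j, j < r.length → (g.getD i []).getD j [] =
    if (i < m ∨ (i = m ∧ j < t)) ∧ i ≠ j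
    then pvPairLcs (r.getD i "").toList (r.getD j "").toList else [])

theorem pvGrid_final (r : List String) (g : List (List (List String)))
    (hg : pvGridOK r r.length g) :
    g = (PySem.List.pyRange 0 (r.length : Int) 1).map (fun i =>
      (PySem.List.pyRange 0 (r.length : Int) 1).map (fun j =>
        if i ≠ j then
          pvPairLcs (PySem.List.pyGetD r i "").toList (PySem.List.pyGetD r j "").toList
        else [])) := by
  obtain ⟨hlen, hrlen, hval⟩ := hg
  rw [pvRangeZeroNat, List.map_map]
  apply List.ext_getElem
  · simp [hlen]
  · intro i hi hi2
    simp only [Function.comp_def, List.getElem_map, List.getElem_range]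
    have hiR : i < r.length := by simpa using hi2
    apply List.ext_getElem
    · have hr := hrlen i hiR
      rw [List.getD_eq_getElem g [] (by omega)] at hr
      simp [hr]
    · intro j hj hj2
      simp only [List.map_map, Function.comp_def, List.getElem_map, List.getElem_range]
      have hjR : j < r.length := by
        have := hj
        rw [← List.getD_eq_getElem g [] (by omega)] at this
        rw [hrlen i hiR] at this
        exact this
      have hrow : g.getD i [] = g[i] := List.getD_eq_getElem g [] (by omega)
      have hcell : (g.getD i []).getD j [] = g[i][j] := by
        rw [hrow]
        exact List.getD_eq_getElem _ [] hj
      rw [← hcell, hval i hiR j hjR]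
      simp only [PySem.List.pyGetD_natCast, ne_eq, Nat.cast_inj]
      by_cases hij : i = j
      · rw [if_neg (by omega), if_neg (by simpa using hij)]
      · rw [if_pos ⟨hiR, hij⟩, if_pos (by simpa using hij)]

-- ===== VERDICT (by name: the statement is the Claim_ definition above) =====
theorem get_subseq_grid_py_spec : Claim_equal_get_subseq_grid_py := by
  intro r _hdom
  unfold Spec_get_subseq_grid_py
  rw [get_subseq_grid_py, get_subseq_grid_py_alt]
  apply pvGrid_final
  refine pvFoldPyRangeInv0 (pvGridOK r) _ r.length _ ?_ ?_
  · simp only [pvMapConst]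
    refine ⟨by simp, ?_, ?_⟩
    · intro i hi
      rw [List.getD_replicate _ (by omega : i < r.length)]
      simp
    · intro i hi j hj
      rw [List.getD_replicate _ (by omega : i < r.length),
          List.getD_replicate _ (by omega : j < r.length)]
      rw [if_neg (by omega)]
  · intro m g hm hG
    have key : ∀ g', pvGridMid r m r.length g' → pvGridOK r (m + 1) g' := by
      intro g' ⟨h1, h2, h3⟩
      refine ⟨h1, h2, ?_⟩
      intro i hi j hj
      rw [h3 i hi j hj]
      exact if_congr (by omega) rfl rfl
    apply key
    refine pvFoldPyRangeInv0 (pvGridMid r m) _ r.length _ ?_ ?_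
    · obtain ⟨h1, h2, h3⟩ := hG
      refine ⟨h1, h2, ?_⟩
      intro i hi j hj
      rw [h3 i hi j hj]
      exact if_congr (by omega) rfl rfl
    · intro t g' ht hG'
      obtain ⟨h1, h2, h3⟩ := hG'
      by_cases hmt : m = t
      · rw [if_neg (by simpa using hmt)]
        refine ⟨h1, h2, ?_⟩
        intro i hi j hj
        rw [h3 i hi j hj]
        exact if_congr (by omega) rfl rfl
      · rw [if_pos (by simpa using hmt)]
        simp only [PySem.List.pyGetD_natCast, PySem.List.pySetD_natCast]
        have hmg : m < g'.length := by omega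
        have htg : t < (g'.getD m []).length := by rw [h2 m (by omega)]; omega
        refine ⟨by simp [h1], ?_, ?_⟩
        · intro i hi
          rw [pvGetDSet _ _ _ _ _ hmg]
          split
          · rw [List.length_set]
            exact h2 m (by omega)
          · exact h2 i hi
        · intro i hi j hj
          rw [pvGetDSet _ _ _ _ _ hmg]
          by_cases him : i = m
          · rw [if_pos him, him, pvGetDSet _ _ _ _ _ htg]
            by_cases hjt : j = t
            · rw [if_pos hjt, if_pos (by omega), hjt]
              exact pvPair_eq _ _
            · rw [if_neg hjt, h3 m (by omega) j hj]
              exact if_congr (by omega) rfl rfl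
          · rw [if_neg him, h3 i hi j hj]
            exact if_congr (by omega) rfl rfl
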